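-- pv_equiv track=rewrite | github.com/PieroL1/AlgoritmosEvolutivos | Semana5/ejercicio5.py | contar_solapamientos
-- ===== SOURCE A (Python) =====
-- def contar_solapamientos(asignacion):
--     # Contar cuántos tesistas están asignados a la misma (sala, franja)
--     conteo = {}
--     solapamientos = 0
--     for s in asignacion:
--         conteo[s] = conteo.get(s, 0) + 1
--     for v in conteo.values():
--         if v > 1:
--             solapamientos += v - 1
--     return solapamientos
-- ===== SOURCE B (Python) =====
-- def contar_solapamientos(asignacion):
--     # total assignments minus distinct (sala, franja) slots: sum(v-1) == total - distinct
--     total = 0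
--     vistos = set()
--     for s in asignacion:
--         total += 1
--         vistos.add(s)
--     return total - len(vistos)
-- ===== Notes on version B (the rewrite author's own statement) =====
-- stated objective: simpler
-- what changed: Replaces the frequency dict plus a second loop summing excesses by a single pass keeping a running total and a set of seen slots, returning total - len(vistos) via the identity sum(v-1) = total - distinct.
import Mathlib
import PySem

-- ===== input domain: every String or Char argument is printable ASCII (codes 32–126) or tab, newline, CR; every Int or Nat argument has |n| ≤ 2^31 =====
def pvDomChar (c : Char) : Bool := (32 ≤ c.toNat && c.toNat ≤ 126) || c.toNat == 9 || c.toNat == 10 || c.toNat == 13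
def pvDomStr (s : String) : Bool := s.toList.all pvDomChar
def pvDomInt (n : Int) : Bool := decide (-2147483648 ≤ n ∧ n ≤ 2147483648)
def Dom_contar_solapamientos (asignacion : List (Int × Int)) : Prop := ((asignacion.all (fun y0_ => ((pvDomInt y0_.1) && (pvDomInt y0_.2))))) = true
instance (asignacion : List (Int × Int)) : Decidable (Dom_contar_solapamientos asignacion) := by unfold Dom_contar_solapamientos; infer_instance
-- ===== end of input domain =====

-- B replaces A's frequency dict + excess-summing loop by one pass that counts items and
-- collects distinct slots, returning total - distinct (objective: simpler).

-- ===== PORT A =====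
def contar_solapamientos (asignacion : List (Int × Int)) : Int :=
  let conteo := asignacion.foldl
    (fun (d : PySem.Dict (Int × Int) Int) s => d.insert s (d.getD s 0 + 1)) PySem.Dict.empty
  conteo.values.foldl (fun sol v => if v > 1 then sol + (v - 1) else sol) 0

-- ===== PORT B =====
def contar_solapamientos_alt (asignacion : List (Int × Int)) : Int :=
  let p := asignacion.foldl
    (fun (p : Int × PySem.Set (Int × Int)) s => (p.1 + 1, PySem.Set.add p.2 s))
    (0, PySem.Set.empty)
  p.1 - PySem.Set.len p.2

-- ===== PRECONDITION & SPEC =====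
def Spec_contar_solapamientos (asignacion : List (Int × Int)) (out : Int) : Prop := out = contar_solapamientos_alt asignacion
instance (asignacion : List (Int × Int)) (out : Int) : Decidable (Spec_contar_solapamientos asignacion out) := by unfold Spec_contar_solapamientos; infer_instance

-- ===== CLAIM (what is proved, stated in full; the proofs are below) =====
def Claim_equal_contar_solapamientos : Prop := ∀ (asignacion : List (Int × Int)), Dom_contar_solapamientos asignacion → Spec_contar_solapamientos asignacion (contar_solapamientos asignacion)

-- ===== LEMMAS AND PROOFS =====

-- B's paired fold splits into the length count and the set of seen elements.
theorem pv_pairfold (xs : List (Int × Int)) :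
    ∀ (t : Int) (s : PySem.Set (Int × Int)),
      xs.foldl (fun (p : Int × PySem.Set (Int × Int)) x => (p.1 + 1, PySem.Set.add p.2 x)) (t, s)
        = (t + xs.length, xs.foldl PySem.Set.add s) := by
  induction xs with
  | nil => intro t s; simp
  | cons x xs ih =>
    intro t s
    simp only [List.foldl_cons, ih, List.length_cons]
    congr 1
    push_cast
    ring

-- Summing (count-1) over a list of keys, each occurring in xs, equals (sum of counts) - (#keys).
theorem pv_sum_excess (xs : List (Int × Int)) :
    ∀ (keys : List (Int × Int)) (acc : Int), (∀ k ∈ keys, k ∈ xs) →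
      (keys.map (fun k => (xs.count k : Int))).foldl
          (fun sol v => if v > 1 then sol + (v - 1) else sol) acc
        = acc + (keys.map (fun k => (xs.count k : Int))).sum - keys.length := by
  intro keys
  induction keys with
  | nil => intro acc _; simp
  | cons k keys ih =>
    intro acc h
    have hk : k ∈ xs := h k (by simp)
    have hc : 1 ≤ xs.count k := List.count_pos_iff.mpr hk
    have step : (if (xs.count k : Int) > 1 then acc + ((xs.count k : Int) - 1) else acc)
        = acc + ((xs.count k : Int) - 1) := by
      by_cases h1 : (xs.count k : Int) > 1
      · simp [h1]
      · have : (xs.count k : Int) = 1 := by omega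
        simp [this]
    simp only [List.map_cons, List.foldl_cons, step,
      ih _ (fun a ha => h a (List.mem_cons_of_mem _ ha)), List.sum_cons, List.length_cons]
    push_cast
    ring

-- Lean core's product BEq and Mathlib's decidable-equality BEq count identically.
theorem pv_count_inst (a : Int × Int) (l : List (Int × Int)) :
    @List.count _ instBEqProd a l = @List.count _ instBEqOfDecidableEq a l := by
  induction l with
  | nil => rfl
  | cons b l ih => simp [List.count_cons, ih]

-- The distinct-first-occurrence list has the same count-sum as the length of xs.
theorem pv_sum_counts (xs : List (Int × Int)) :
    ((PySem.Set.ofList xs).map (fun k => (xs.count k : Int))).sum = xs.length := by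
  have hperm : (PySem.Set.ofList xs).Perm xs.dedup := by
    refine (List.perm_ext_iff_of_nodup (PySem.Set.nodup_ofList xs) xs.nodup_dedup).mpr ?_
    intro a
    rw [PySem.Set.mem_ofList, List.mem_dedup]
  rw [(hperm.map _).sum_eq, ← List.sum_map_count_dedup_eq_length xs,
    Nat.cast_list_sum, List.map_map]
  congr 1
  apply List.map_congr_left
  intro a _
  simp only [Function.comp_apply, pv_count_inst]

-- ===== VERDICT (by name: the statement is the Claim_ definition above) =====
theorem contar_solapamientos_spec : Claim_equal_contar_solapamientos := by
  intro xs _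
  unfold Spec_contar_solapamientos
  have hA : contar_solapamientos xs
      = (PySem.Dict.counter xs).values.foldl (fun sol v => if v > 1 then sol + (v - 1) else sol) 0 := rfl
  have hB : contar_solapamientos_alt xs
      = (0 + (xs.length : Int)) - PySem.Set.len (xs.foldl PySem.Set.add PySem.Set.empty) := by
    unfold contar_solapamientos_alt
    rw [pv_pairfold xs 0 PySem.Set.empty]
  rw [hA, hB]
  have hv : (PySem.Dict.counter xs).values
      = (PySem.Set.ofList xs).map (fun k => (xs.count k : Int)) := by
    show ((PySem.Dict.counter xs).items).map (·.2) = _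
    rw [PySem.Dict.items_counter, List.map_map]
    rfl
  rw [hv, pv_sum_excess xs (PySem.Set.ofList xs) 0
        (fun k hk => (PySem.Set.mem_ofList xs k).mp hk),
      pv_sum_counts xs]
  have hs : xs.foldl PySem.Set.add PySem.Set.empty = PySem.Set.ofList xs :=
    (PySem.Set.ofList_eq_foldl xs).symm
  rw [hs]
  rfl
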